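-- pv_equiv track=rewrite | github.com/IrishRugbyman/codes-prepa | semaine 1B.py | MatriceOK
-- ===== SOURCE A (Python) =====
-- def MatriceOK(T):
--     n = len(T)
--     N = [i for i in range(1, (n ** 2) + 1)]
--     for i in range(n):
--         for j in range(n):
--             if N.count(T[i][j]) == 1:
--                 N.remove(T[i][j])
--     if N == []:
--         return True
--     return False
-- ===== SOURCE B (Python) =====
-- def MatriceOK(T):
--     n = len(T)
--     flat = [row[j] for row in T for j in range(n)]
--     return sorted(flat) == list(range(1, n * n + 1))
-- ===== Notes on version B (the rewrite author's own statement) =====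
-- stated objective: faster
-- what changed: Replaces A's per-cell count/remove scan against a mutating candidate list with a single flatten, sort, and comparison against list(range(1, n*n+1)).
import Mathlib
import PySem

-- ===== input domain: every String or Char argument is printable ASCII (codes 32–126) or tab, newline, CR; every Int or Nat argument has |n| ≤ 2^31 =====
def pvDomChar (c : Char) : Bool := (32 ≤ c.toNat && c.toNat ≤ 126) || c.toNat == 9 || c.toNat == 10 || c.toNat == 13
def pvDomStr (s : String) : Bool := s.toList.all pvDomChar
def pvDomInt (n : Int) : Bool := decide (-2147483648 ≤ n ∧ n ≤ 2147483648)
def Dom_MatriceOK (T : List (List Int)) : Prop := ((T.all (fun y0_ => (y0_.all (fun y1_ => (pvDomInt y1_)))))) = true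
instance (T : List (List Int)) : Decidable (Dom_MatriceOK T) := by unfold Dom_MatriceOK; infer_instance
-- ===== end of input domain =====

-- B replaces A's per-cell count/remove scan on a mutating candidate list with flatten + sort + compare to range(1, n*n+1); measurably faster (A rescans the mutating candidate list per cell).

-- ===== PORT A =====
def MatriceOK (T : List (List Int)) : Bool :=
  let n : Nat := T.length
  let N := (PySem.List.pyRange 0 (n : Int) 1).foldl (fun N i =>
    (PySem.List.pyRange 0 (n : Int) 1).foldl (fun N j =>
      -- T[i][j]; Pre_ guarantees the indices are in range (pyGetD default never read)
      let x := PySem.List.pyGetD (PySem.List.pyGetD T i []) j 0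
      if PySem.List.count N x = 1 then (PySem.List.remove? N x).getD N else N) N)
    (PySem.List.pyRange 1 ((n : Int) ^ 2 + 1) 1)
  decide (N = [])

-- ===== PORT B =====
def MatriceOK_alt (T : List (List Int)) : Bool :=
  let n : Nat := T.length
  let flat := T.flatMap (fun row => (PySem.List.pyRange 0 (n : Int) 1).map (fun j => PySem.List.pyGetD row j 0))
  decide (PySem.List.sorted flat (fun x => x) false = PySem.List.pyRange 1 ((n : Int) * (n : Int) + 1) 1)

-- ===== PRECONDITION & SPEC =====
-- Pre_ excludes ragged inputs where some row is shorter than the number of rows: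
-- there both A and B raise IndexError on row[j].
def Pre_MatriceOK (T : List (List Int)) : Prop := ∀ row ∈ T, T.length ≤ row.length
instance (T : List (List Int)) : Decidable (Pre_MatriceOK T) := by unfold Pre_MatriceOK; infer_instance
def pvWitness_MatriceOK : List (List Int) := [[2, 1], [3, 4]]

def Spec_MatriceOK (T : List (List Int)) (out : Bool) : Prop := out = MatriceOK_alt T
instance (T : List (List Int)) (out : Bool) : Decidable (Spec_MatriceOK T out) := by unfold Spec_MatriceOK; infer_instance

-- ===== CLAIM (what is proved, stated in full; the proofs are below) =====
def Claim_equal_MatriceOK : Prop := ∀ (T : List (List Int)), Dom_MatriceOK T → Pre_MatriceOK T → Spec_MatriceOK T (MatriceOK T)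

-- ===== LEMMAS AND PROOFS =====

-- A's per-cell step, as a function of the current candidate list and the cell value
def pvStep (N : List Int) (x : Int) : List Int :=
  if PySem.List.count N x = 1 then (PySem.List.remove? N x).getD N else N

lemma pvStep_nodup (N : List Int) (x : Int) (h : N.Nodup) : pvStep N x = N.filter (fun v => v != x) := by
  unfold pvStep
  by_cases hx : x ∈ N
  · rw [PySem.List.count_eq, List.count_eq_one_of_mem h hx, if_pos rfl,
      PySem.List.remove?_eq_some_erase N x hx, Option.getD_some, List.Nodup.erase_eq_filter h]
  · rw [PySem.List.count_eq, List.count_eq_zero.mpr hx, if_neg (by omega)]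
    exact (List.filter_eq_self.mpr (fun v hv => by simp; rintro rfl; exact hx hv)).symm

lemma pvFold_step (xs : List Int) (N : List Int) (h : N.Nodup) :
    xs.foldl pvStep N = N.filter (fun v => decide (v ∉ xs)) := by
  induction xs generalizing N with
  | nil => simp
  | cons x xs ih =>
      rw [List.foldl_cons, pvStep_nodup N x h, ih _ (h.filter _), List.filter_filter]
      apply List.filter_congr
      intro v _
      by_cases hvx : v = x <;> by_cases hvxs : v ∈ xs <;> simp [hvx, hvxs]

-- B's row extraction: with n ≤ |row|, the comprehension over range(n) is the first n cells
lemma pvRow_take (row : List Int) (n : Nat) (h : n ≤ row.length) :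
    (PySem.List.pyRange 0 (n : Int) 1).map (fun j => PySem.List.pyGetD row j 0) = row.take n := by
  rw [PySem.List.pyRange_one]
  simp only [List.map_map]
  apply List.ext_getElem
  · simpa using h
  · intro i h1 h2
    simp only [List.getElem_map, List.getElem_range, Function.comp_apply, zero_add,
      List.getElem_take]
    rw [PySem.List.pyGetD_natCast]
    rw [List.getD_eq_getElem?_getD, List.getElem?_eq_getElem (by simp at h1; omega)]
    rfl

lemma pvFlat_length (T : List (List Int)) (n : Nat) (hn : n = T.length)
    (hp : ∀ row ∈ T, n ≤ row.length) :
    (T.flatMap (fun row => row.take n)).length = n * n := by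
  rw [List.length_flatMap]
  have : T.map (fun row => (row.take n).length) = List.replicate T.length n := by
    apply List.eq_replicate_iff.mpr
    constructor
    · simp
    · intro b hb
      simp only [List.mem_map] at hb
      obtain ⟨row, hrow, rfl⟩ := hb
      simp [Nat.min_eq_left (hp row hrow)]
  rw [this, List.sum_replicate, smul_eq_mul, hn]

-- the outer double loop of A is a fold of pvStep over the flattened first-n-columns cells
lemma pvA_fold (T : List (List Int)) (hp : Pre_MatriceOK T) (N0 : List Int) :
    (PySem.List.pyRange 0 (T.length : Int) 1).foldl (fun N i =>
      (PySem.List.pyRange 0 (T.length : Int) 1).foldl (fun N j =>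
        pvStep N (PySem.List.pyGetD (PySem.List.pyGetD T i []) j 0)) N) N0
    = (T.flatMap (fun row => row.take T.length)).foldl pvStep N0 := by
  rw [List.foldl_flatMap]
  rw [PySem.List.foldl_pyRange_zero_pyGetD' T ([] : List Int)
    (fun N row => (PySem.List.pyRange 0 (T.length : Int) 1).foldl
      (fun N j => pvStep N (PySem.List.pyGetD row j 0)) N) N0]
  apply PySem.List.foldl_congr_mem
  intro acc row hrow
  rw [← pvRow_take row T.length (hp row hrow), List.foldl_map]

theorem MatriceOK_spec : Claim_equal_MatriceOK := by
  intro T _ hp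
  unfold Spec_MatriceOK MatriceOK MatriceOK_alt
  simp only []
  set n := T.length with hn
  set N0 := PySem.List.pyRange 1 ((n : Int) ^ 2 + 1) 1 with hN0
  have hflatdef : T.flatMap (fun row => (PySem.List.pyRange 0 (n : Int) 1).map
      (fun j => PySem.List.pyGetD row j 0)) = T.flatMap (fun row => row.take n) := by
    apply List.flatMap_congr
    intro row hrow
    exact pvRow_take row n (hp row hrow)
  set flat := T.flatMap (fun row => row.take n) with hflat
  have hsq : (n : Int) * (n : Int) + 1 = (n : Int) ^ 2 + 1 := by ring
  rw [hflatdef, hsq]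
  -- reduce A's fold
  have hfoldA : (PySem.List.pyRange 0 (n : Int) 1).foldl (fun N i =>
      (PySem.List.pyRange 0 (n : Int) 1).foldl (fun N j =>
        (fun N x => if PySem.List.count N x = 1 then (PySem.List.remove? N x).getD N else N) N
          (PySem.List.pyGetD (PySem.List.pyGetD T i []) j 0)) N) N0
      = N0.filter (fun v => decide (v ∉ flat)) := by
    rw [show (fun (N : List Int) (x : Int) => if PySem.List.count N x = 1 then (PySem.List.remove? N x).getD N else N) = pvStep from rfl]
    rw [pvA_fold T hp N0, pvFold_step _ _ (PySem.List.nodup_pyRange_one _ _)]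
  rw [hfoldA]
  -- both sides are now decidable propositions about flat and N0
  have hlenN0 : N0.length = n * n := by
    rw [hN0, PySem.List.length_pyRange_one]
    have : ((n : Int) ^ 2 + 1 - 1) = ((n * n : Nat) : Int) := by push_cast; ring
    rw [this, Int.toNat_natCast]
  have hlenflat : flat.length = n * n := pvFlat_length T n rfl hp
  have key : (N0.filter (fun v => decide (v ∉ flat)) = []) ↔
      PySem.List.sorted flat (fun x => x) false = N0 := by
    rw [List.filter_eq_nil_iff]
    constructor
    · intro h
      have hsub : N0 ⊆ flat := by
        intro v hv
        have := h v hv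
        simpa using this
      have hperm : N0.Perm flat :=
        (List.subperm_of_subset (PySem.List.nodup_pyRange_one _ _) hsub).perm_of_length_le
          ((hlenflat.trans hlenN0.symm).le)
      exact PySem.List.sorted_eq_of_perm_of_pairwise_lt flat N0 (fun x => x) hperm
        (PySem.List.pairwise_lt_pyRange_one _ _)
    · intro h v hv
      have hperm : flat.Perm N0 := h ▸ (PySem.List.sorted_perm flat (fun x => x) false).symm
      simp only [decide_not, Bool.not_eq_eq_eq_not, Bool.not_true, decide_eq_false_iff_not,
        Decidable.not_not]
      exact (hperm.mem_iff).mpr hv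
  simp only [decide_eq_decide]
  exact key
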